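-- pv_equiv track=rewrite | github.com/danieleschmidt/echoloc-nn | .terragon/value_discovery.py | _plan_execution
-- ===== SOURCE A (Python) =====
-- from typing import Dict, List, Tuple, Any, Optional
--
-- def _plan_execution(prioritized_items: List[Dict[str, Any]]) -> Dict[str, Any]:
--     """Plan autonomous execution of high-priority items"""
--     execution_plan = {
--         "immediate_actions": [],
--         "scheduled_actions": [],
--         "manual_review_required": []
--     }
--
--     for item in prioritized_items:
--         if item["priority_category"] == "critical":
--             execution_plan["immediate_actions"].append(item)
--         elif item["priority_category"] == "high":
--             execution_plan["scheduled_actions"].append(item)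
--         else:
--             execution_plan["manual_review_required"].append(item)
--
--     return execution_plan
-- ===== SOURCE B (Python) =====
-- def _plan_execution(prioritized_items):
--     """Plan autonomous execution of high-priority items"""
--     return {
--         "immediate_actions":
--             [it for it in prioritized_items if it["priority_category"] == "critical"],
--         "scheduled_actions":
--             [it for it in prioritized_items if it["priority_category"] == "high"],
--         "manual_review_required":
--             [it for it in prioritized_items
--              if it["priority_category"] not in ("critical", "high")],
--     }
-- ===== Notes on version B (the rewrite author's own statement) =====
-- stated objective: alternative
-- what changed: Replaces the single dispatching loop that appends into a mutable three-bucket dict with three independent list-comprehension filters over the input, one per bucket, assembled into the result dict.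
import Mathlib
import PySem

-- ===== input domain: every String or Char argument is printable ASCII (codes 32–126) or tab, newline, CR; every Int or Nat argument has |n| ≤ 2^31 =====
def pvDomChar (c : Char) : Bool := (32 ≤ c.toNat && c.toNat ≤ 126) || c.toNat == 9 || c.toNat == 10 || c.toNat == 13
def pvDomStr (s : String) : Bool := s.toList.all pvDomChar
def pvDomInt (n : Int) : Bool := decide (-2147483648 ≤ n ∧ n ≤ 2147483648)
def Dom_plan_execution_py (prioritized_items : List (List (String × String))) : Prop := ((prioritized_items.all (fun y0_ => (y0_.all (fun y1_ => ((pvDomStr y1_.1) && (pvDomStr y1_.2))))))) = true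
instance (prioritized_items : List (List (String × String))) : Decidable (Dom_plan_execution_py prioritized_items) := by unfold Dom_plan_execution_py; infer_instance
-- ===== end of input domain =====

-- B replaces A's single dispatching loop over a mutable three-bucket dict with three
-- independent filtering passes, one per bucket (alternative decomposition, same cost).

-- ===== PORT A =====
-- item["priority_category"]; Pre_ guarantees the key is present, so the "" default is never used
def pvCat (item : List (String × String)) : String :=
  (PySem.Dict.mk item).getD "priority_category" ""

def plan_execution_py (prioritized_items : List (List (String × String))) : List (String × List (List (String × String))) :=
  (prioritized_items.foldl
    (fun d item =>
      if pvCat item == "critical" then d.modify "immediate_actions" [] (· ++ [item])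
      else if pvCat item == "high" then d.modify "scheduled_actions" [] (· ++ [item])
      else d.modify "manual_review_required" [] (· ++ [item]))
    (PySem.Dict.ofList [("immediate_actions", []), ("scheduled_actions", []), ("manual_review_required", [])])).items

-- ===== PORT B =====
def plan_execution_py_alt (prioritized_items : List (List (String × String))) : List (String × List (List (String × String))) :=
  [("immediate_actions", prioritized_items.filter (fun it => pvCat it == "critical")),
   ("scheduled_actions", prioritized_items.filter (fun it => pvCat it == "high")),
   ("manual_review_required", prioritized_items.filter
      (fun it => !(pvCat it == "critical") && !(pvCat it == "high")))]

-- ===== PRECONDITION & SPEC =====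
-- Pre_ excludes exactly the inputs where some item lacks the "priority_category" key, on which A raises KeyError.
def Pre_plan_execution_py (prioritized_items : List (List (String × String))) : Prop :=
  ∀ item ∈ prioritized_items, "priority_category" ∈ item.map (·.1)
instance (prioritized_items : List (List (String × String))) : Decidable (Pre_plan_execution_py prioritized_items) := by unfold Pre_plan_execution_py; infer_instance
def pvWitness_plan_execution_py : (List (List (String × String))) :=
  [[("priority_category", "critical")], [("priority_category", "low"), ("id", "7")]]
def Spec_plan_execution_py (prioritized_items : List (List (String × String))) (out : List (String × List (List (String × String)))) : Prop := out = plan_execution_py_alt prioritized_items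
instance (prioritized_items : List (List (String × String))) (out : List (String × List (List (String × String)))) : Decidable (Spec_plan_execution_py prioritized_items out) := by unfold Spec_plan_execution_py; infer_instance

-- ===== CLAIM (what is proved, stated in full; the proofs are below) =====
def Claim_equal_plan_execution_py : Prop := ∀ (prioritized_items : List (List (String × String))), Dom_plan_execution_py prioritized_items → Pre_plan_execution_py prioritized_items → Spec_plan_execution_py prioritized_items (plan_execution_py prioritized_items)

-- ===== LEMMAS AND PROOFS =====

-- the three-bucket dict with symbolic bucket contents
def pvMk3 (I S M : List (List (String × String))) : PySem.Dict String (List (List (String × String))) :=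
  PySem.Dict.mk [("immediate_actions", I), ("scheduled_actions", S), ("manual_review_required", M)]

lemma pvFold_inv (l : List (List (String × String))) :
    ∀ I S M, l.foldl
      (fun d item =>
        if pvCat item == "critical" then d.modify "immediate_actions" [] (· ++ [item])
        else if pvCat item == "high" then d.modify "scheduled_actions" [] (· ++ [item])
        else d.modify "manual_review_required" [] (· ++ [item]))
      (pvMk3 I S M)
    = pvMk3 (I ++ l.filter (fun it => pvCat it == "critical"))
            (S ++ l.filter (fun it => pvCat it == "high"))
            (M ++ l.filter (fun it => !(pvCat it == "critical") && !(pvCat it == "high"))) := by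
  induction l with
  | nil => intro I S M; simp
  | cons x xs ih =>
    intro I S M
    simp only [List.foldl_cons]
    by_cases hc : pvCat x == "critical"
    · have hc' : pvCat x = "critical" := by simpa using hc
      have hh : (pvCat x == "high") = false := by rw [hc']; rfl
      have hstep : (pvMk3 I S M).modify "immediate_actions" [] (· ++ [x]) = pvMk3 (I ++ [x]) S M := by
        simp [pvMk3, PySem.Dict.modify, PySem.Dict.contains, PySem.Dict.getD, PySem.Dict.get?, PySem.Dict.insert]
      rw [if_pos hc, hstep, ih]
      simp [hc, hh]
    · by_cases hh : pvCat x == "high"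
      · have hstep : (pvMk3 I S M).modify "scheduled_actions" [] (· ++ [x]) = pvMk3 I (S ++ [x]) M := by
          simp [pvMk3, PySem.Dict.modify, PySem.Dict.contains, PySem.Dict.getD, PySem.Dict.get?, PySem.Dict.insert]
        rw [if_neg hc, if_pos hh, hstep, ih]
        simp [hc, hh]
      · have hstep : (pvMk3 I S M).modify "manual_review_required" [] (· ++ [x]) = pvMk3 I S (M ++ [x]) := by
          simp [pvMk3, PySem.Dict.modify, PySem.Dict.contains, PySem.Dict.getD, PySem.Dict.get?, PySem.Dict.insert]
        rw [if_neg hc, if_neg hh, hstep, ih]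
        simp [hc, hh]

-- ===== VERDICT (by name: the statement is the Claim_ definition above) =====
theorem plan_execution_py_spec : Claim_equal_plan_execution_py := by
  intro l _ _
  show plan_execution_py l = plan_execution_py_alt l
  have h0 : (PySem.Dict.ofList
      ([("immediate_actions", []), ("scheduled_actions", []), ("manual_review_required", [])] :
        List (String × List (List (String × String))))) = pvMk3 [] [] [] := by decide
  rw [plan_execution_py, h0, pvFold_inv]
  rfl
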